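-- pv_equiv track=rewrite | github.com/dragneel786/leetcode_practise | 2525-categorize-box-according-to-criteria/2525-categorize-box-according-to-criteria.py | categorizeBox
-- ===== SOURCE A (Python) =====
-- def categorizeBox(length: int, width: int, height: int, mass: int) -> str:
--     volume = length * height * width
--     if(any(x > 9999 for x in (length, width, height))\
--        or volume > (10 ** 9 - 1)):
--         return 'Bulky' if(mass < 100) else 'Both'
--
--     if(mass > 99):
--         return 'Heavy'
--
--     return "Neither"
-- ===== SOURCE B (Python) =====
-- def categorizeBox(length: int, width: int, height: int, mass: int) -> str:
--     # Recursive scan over the dimension list: one pass computes the volume and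
--     # whether any dimension is oversize; then a pattern match on the flag pair.
--     def scan(dims):
--         if not dims:
--             return (1, False)
--         v, big = scan(dims[1:])
--         return (dims[0] * v, big or dims[0] > 9999)
--
--     volume, oversize = scan([length, width, height])
--     match (oversize or volume >= 10 ** 9, mass >= 100):
--         case (True, True):
--             return 'Both'
--         case (True, False):
--             return 'Bulky'
--         case (False, True):
--             return 'Heavy'
--         case (False, False):
--             return 'Neither'
-- ===== Notes on version B (the rewrite author's own statement) =====
-- stated objective: alternative
-- what changed: Replaces A's branch-first early returns with a recursive single-pass scan over the dimension list that accumulates (volume, oversize-flag) together, followed by an exhaustive pattern match on the (bulky, heavy) flag pair using >= thresholds.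
import Mathlib
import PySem

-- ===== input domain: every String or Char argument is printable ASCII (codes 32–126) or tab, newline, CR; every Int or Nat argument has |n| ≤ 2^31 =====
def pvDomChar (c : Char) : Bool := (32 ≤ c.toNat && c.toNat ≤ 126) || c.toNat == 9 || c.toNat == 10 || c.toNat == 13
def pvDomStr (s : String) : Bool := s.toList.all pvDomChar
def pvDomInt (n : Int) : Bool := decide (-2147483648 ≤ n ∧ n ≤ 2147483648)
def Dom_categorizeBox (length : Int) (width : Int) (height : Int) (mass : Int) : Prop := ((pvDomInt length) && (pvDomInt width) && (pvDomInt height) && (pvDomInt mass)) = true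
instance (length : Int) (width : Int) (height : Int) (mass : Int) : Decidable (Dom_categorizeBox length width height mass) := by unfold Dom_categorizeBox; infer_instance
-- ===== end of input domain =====

-- ===== PORT A =====
-- B: one recursive pass over the dimension list accumulating (volume, oversize flag), then a pattern match (objective: alternative).
def categorizeBox (length : Int) (width : Int) (height : Int) (mass : Int) : String :=
  let volume := length * height * width
  if [length, width, height].any (fun x => decide (x > 9999)) || decide (volume > 10 ^ 9 - 1) then
    if mass < 100 then "Bulky" else "Both"
  else if mass > 99 then "Heavy"
  else "Neither"

-- ===== PORT B =====
def pvScanDims : List Int → Int × Bool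
  | [] => (1, false)
  | d :: rest =>
    let (v, big) := pvScanDims rest
    (d * v, big || decide (d > 9999))

def categorizeBox_alt (length : Int) (width : Int) (height : Int) (mass : Int) : String :=
  let (volume, oversize) := pvScanDims [length, width, height]
  match oversize || decide (volume ≥ 10 ^ 9), decide (mass ≥ 100) with
  | true, true => "Both"
  | true, false => "Bulky"
  | false, true => "Heavy"
  | false, false => "Neither"

-- ===== PRECONDITION & SPEC =====
def Spec_categorizeBox (length : Int) (width : Int) (height : Int) (mass : Int) (out : String) : Prop := out = categorizeBox_alt length width height mass
instance (length : Int) (width : Int) (height : Int) (mass : Int) (out : String) : Decidable (Spec_categorizeBox length width height mass out) := by unfold Spec_categorizeBox; infer_instance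

-- ===== CLAIM (what is proved, stated in full; the proofs are below) =====
def Claim_equal_categorizeBox : Prop := ∀ (length : Int) (width : Int) (height : Int) (mass : Int), Dom_categorizeBox length width height mass → Spec_categorizeBox length width height mass (categorizeBox length width height mass)

-- ===== LEMMAS AND PROOFS =====

-- ===== VERDICT (by name: the statement is the Claim_ definition above) =====
theorem categorizeBox_spec : Claim_equal_categorizeBox := by
  intro length width height mass _
  unfold Spec_categorizeBox categorizeBox categorizeBox_alt pvScanDims
  have hv : length * height * width = length * (width * height) := by ring
  simp only [List.any_cons, List.any_nil, Bool.or_false, hv]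
  by_cases h1 : length > 9999 <;> by_cases h2 : width > 9999 <;> by_cases h3 : height > 9999 <;>
    by_cases h4 : (999999999:Int) < length * (width * height) <;> by_cases h5 : mass > 99 <;>
    simp [pvScanDims, h1, h2, h3, h4, h5, show mass < 100 ↔ ¬ mass > 99 from by omega,
      show (1000000000:Int) ≤ length * (width * height) ↔ (999999999:Int) < length * (width * height) from by omega,
      show mass ≥ 100 ↔ mass > 99 from by omega]
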